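-- pv_equiv track=rewrite | github.com/rodriguezmatirp/Lab-Main | Sem 4/CN_Lab/PS_5/1/hamming_code.py | correct_data
-- ===== SOURCE A (Python) =====
-- def correct_data(data,pos,pb):
--     msg = 'No error detected'
--     if pos != -1:
--         data[pos] = data[pos] ^ 1
--         msg = 'Error Detected'
--     for x in range(pb ,0,-1):
--         data.pop(2**(x-1)-1)
--     data.reverse()
--
--     return "".join(list(str(x) for x in data)),msg
-- ===== SOURCE B (Python) =====
-- # Same result as A; also mutates `data` in place to the same final state (on inputs
-- # where A does not raise). One filtering pass instead of repeated list.pop calls.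
-- def correct_data(data, pos, pb):
--     msg = 'No error detected'
--     if pos != -1:
--         data[pos] = data[pos] ^ 1
--         msg = 'Error Detected'
--     parity = {2 ** (x - 1) - 1 for x in range(1, pb + 1)}
--     data[:] = [b for i, b in enumerate(data) if i not in parity][::-1]
--     return ''.join(str(b) for b in data), msg
-- ===== Notes on version B (the rewrite author's own statement) =====
-- stated objective: simpler
-- what changed: A removes the parity bits by pb successive list.pop calls (each an O(n) deletion on the shrinking list) and then reverses in place; B precomputes the set of parity indices and builds the decoded list in one enumerate-filter pass, reversed.
import Mathlib
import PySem

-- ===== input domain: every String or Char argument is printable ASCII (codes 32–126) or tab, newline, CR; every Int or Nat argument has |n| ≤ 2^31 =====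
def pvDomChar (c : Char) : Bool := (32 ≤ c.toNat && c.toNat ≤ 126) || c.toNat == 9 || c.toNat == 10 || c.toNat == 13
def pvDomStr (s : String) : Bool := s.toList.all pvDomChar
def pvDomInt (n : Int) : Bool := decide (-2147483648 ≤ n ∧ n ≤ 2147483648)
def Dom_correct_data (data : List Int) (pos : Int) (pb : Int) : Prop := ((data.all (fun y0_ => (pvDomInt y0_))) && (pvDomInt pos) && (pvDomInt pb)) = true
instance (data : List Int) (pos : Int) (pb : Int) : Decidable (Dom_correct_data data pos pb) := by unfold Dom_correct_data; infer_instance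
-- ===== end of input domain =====

-- B replaces A's pb successive list.pop passes by one enumerate-filter pass over a
-- precomputed set of parity indices (objective: simpler). Both A and B mutate the
-- `data` argument in place to the same final state on all inputs admitted by Pre_;
-- the equivalence proved here is about the return value.


-- "".join(str(x) for x in d) — the identical return expression of both Pythons
def cdJoin (d : List Int) : String := PySem.Str.join "" (d.map PySem.Int.toStr)

-- ===== PORT A =====
-- for x in range(pb, 0, -1): data.pop(2**(x-1)-1)   (none = IndexError from pop)
def cdPops (pb : Int) (d : List Int) : Option (List Int) :=
  (PySem.List.pyRange pb 0 (-1)).foldl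
    (fun acc x => acc.bind (fun l => (PySem.List.pop? l ((2:Int) ^ (x - 1).toNat - 1)).map (·.2)))
    (some d)

def correct_data (data : List Int) (pos : Int) (pb : Int) : String × String :=
  let fixed : Option (List Int × String) :=
    if pos ≠ -1 then
      match PySem.List.pyGet? data pos with
      | some v => some (PySem.List.pySetD data pos (PySem.Int.bxor v 1), "Error Detected")
      | none => none                    -- IndexError (data[pos]): excluded by Pre_
    else some (data, "No error detected")
  match fixed with
  | none => ("", "")
  | some (d, m) =>
    match cdPops pb d with
    | none => ("", "")                  -- IndexError (pop): excluded by Pre_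
    | some d' => (cdJoin d'.reverse, m)

-- ===== PORT B =====
-- parity = {2**(x-1)-1 for x in range(1, pb+1)}
def cdParity (pb : Int) : PySem.Set Int :=
  PySem.Set.ofList ((PySem.List.pyRange 1 (pb + 1) 1).map (fun x => (2:Int) ^ (x - 1).toNat - 1))

-- [b for i, b in enumerate(d) if i not in parity]
def cdKeep (d : List Int) (parity : PySem.Set Int) : List Int :=
  ((PySem.List.enumerate d).filter (fun p => !(PySem.Set.contains parity p.1))).map (·.2)

def correct_data_alt (data : List Int) (pos : Int) (pb : Int) : String × String :=
  if pos ≠ -1 then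
    match PySem.List.pyGet? data pos with
    | none => ("", "")                  -- IndexError (data[pos]), as in A: excluded by Pre_
    | some v =>
      (cdJoin (cdKeep (PySem.List.pySetD data pos (PySem.Int.bxor v 1)) (cdParity pb)).reverse,
       "Error Detected")
  else
    (cdJoin (cdKeep data (cdParity pb)).reverse, "No error detected")

-- ===== PRECONDITION & SPEC =====
-- Pre_ excludes exactly the inputs where the Python A raises IndexError: pos ≠ -1 out of
-- range for data[pos], or pb > 0 with 2^(pb-1) > len(data) so a pop index is out of range
-- (pb ≤ log2(len)+1 is equivalent to 2^(pb-1) ≤ len, stated this way so it is cheap to decide).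
def Pre_correct_data (data : List Int) (pos : Int) (pb : Int) : Prop :=
  (pos = -1 ∨ PySem.Raise.InRange data.length pos) ∧
  (pb ≤ 0 ∨ (data ≠ [] ∧ pb ≤ (Nat.log2 data.length : Int) + 1))
instance (data : List Int) (pos : Int) (pb : Int) : Decidable (Pre_correct_data data pos pb) := by
  unfold Pre_correct_data; infer_instance

def pvWitness_correct_data : List Int × Int × Int := ([1, 0, 1, 1, 0, 1, 0], 2, 3)

def Spec_correct_data (data : List Int) (pos : Int) (pb : Int) (out : String × String) : Prop := out = correct_data_alt data pos pb
instance (data : List Int) (pos : Int) (pb : Int) (out : String × String) : Decidable (Spec_correct_data data pos pb out) := by unfold Spec_correct_data; infer_instance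

-- ===== CLAIM (what is proved, stated in full; the proofs are below) =====
def Claim_equal_correct_data : Prop := ∀ (data : List Int) (pos : Int) (pb : Int), Dom_correct_data data pos pb → Pre_correct_data data pos pb → Spec_correct_data data pos pb (correct_data data pos pb)
-- ===== LEMMAS AND PROOFS =====

-- cdKeep with an explicit enumerate start (proof-side generalisation)
def cdKeepFrom (s : Int) (d : List Int) (S : List Int) : List Int :=
  ((PySem.List.enumerate d s).filter (fun p => !(PySem.Set.contains S p.1))).map (·.2)

lemma contains_eq_false_of_not_mem {S : List Int} {x : Int} (h : x ∉ S) :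
    PySem.Set.contains S x = false := by
  rw [Bool.eq_false_iff]
  exact fun hc => h ((PySem.Set.contains_iff S x).mp hc)

lemma cdKeepFrom_congr (s : Int) (d : List Int) (S S' : List Int)
    (h : ∀ x : Int, x ∈ S ↔ x ∈ S') : cdKeepFrom s d S = cdKeepFrom s d S' := by
  unfold cdKeepFrom
  congr 1
  apply List.filter_congr
  intro p _
  have hc : PySem.Set.contains S p.1 = PySem.Set.contains S' p.1 := by
    by_cases hp : p.1 ∈ S
    · rw [(PySem.Set.contains_iff _ _).mpr hp, (PySem.Set.contains_iff _ _).mpr ((h p.1).mp hp)]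
    · rw [contains_eq_false_of_not_mem hp,
          contains_eq_false_of_not_mem (fun hm => hp ((h p.1).mpr hm))]
  rw [hc]

lemma filter_all_kept (d : List Int) (s : Int) (S : List Int) (h : ∀ x ∈ S, x < s) :
    (PySem.List.enumerate d s).filter (fun p => !(PySem.Set.contains S p.1))
      = PySem.List.enumerate d s := by
  apply List.filter_eq_self.mpr
  intro p hp
  obtain ⟨k, hk, rfl⟩ := (PySem.List.mem_enumerate_iff d s p).mp hp
  have hnm : (s + (k : Int)) ∉ S := fun hmem => by have := h _ hmem; omega
  show (!PySem.Set.contains S (s + (k : Int))) = true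
  rw [contains_eq_false_of_not_mem hnm]
  rfl

lemma cdKeepFrom_nil_set (s : Int) (d : List Int) : cdKeepFrom s d [] = d := by
  unfold cdKeepFrom
  rw [filter_all_kept d s [] (by intro x hx; simp at hx)]
  exact PySem.List.map_snd_enumerate d s

lemma cdKeepFrom_eraseIdx (m : Nat) : ∀ (d : List Int) (s : Int) (S : List Int),
    m < d.length → (∀ x ∈ S, x < s + m) →
    cdKeepFrom s (d.eraseIdx m) S = cdKeepFrom s d ((s + (m : Int)) :: S) := by
  induction m with
  | zero =>
    intro d s S hm hS
    match d with
    | [] => simp at hm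
    | a :: t =>
      simp only [Nat.cast_zero, add_zero]
      simp only [Nat.cast_zero, add_zero] at hS
      unfold cdKeepFrom
      rw [List.eraseIdx_cons_zero, PySem.List.enumerate_cons, List.filter_cons]
      have hhead : PySem.Set.contains (s :: S) s = true :=
        (PySem.Set.contains_iff _ _).mpr (List.mem_cons_self)
      rw [hhead]
      simp only [Bool.not_true, Bool.false_eq_true, if_false]
      rw [filter_all_kept t s S hS,
          filter_all_kept t (s + 1) (s :: S) (by
            intro x hx
            rcases List.mem_cons.mp hx with h | h
            · omega
            · have := hS x h; omega)]
      rw [PySem.List.map_snd_enumerate, PySem.List.map_snd_enumerate]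
  | succ m ih =>
    intro d s S hm hS
    match d with
    | [] => simp at hm
    | a :: t =>
      have hm' : m < t.length := by simpa using hm
      have hS' : ∀ x ∈ S, x < (s + 1) + m := by
        intro x hx; have := hS x hx; push_cast at this ⊢; omega
      have htail := ih t (s + 1) S hm' hS'
      have harith : ((s + 1) + (m : Int)) = s + (((m + 1 : Nat)) : Int) := by push_cast; ring
      rw [harith] at htail
      unfold cdKeepFrom at htail ⊢
      rw [List.eraseIdx_cons_succ, PySem.List.enumerate_cons, PySem.List.enumerate_cons,
          List.filter_cons, List.filter_cons]
      have hhead : PySem.Set.contains ((s + ((m + 1 : Nat) : Int)) :: S) s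
          = PySem.Set.contains S s := by
        by_cases hs : s ∈ S
        · rw [(PySem.Set.contains_iff _ _).mpr (List.mem_cons_of_mem _ hs),
              (PySem.Set.contains_iff _ _).mpr hs]
        · rw [contains_eq_false_of_not_mem hs, contains_eq_false_of_not_mem (by
            intro hc
            rcases List.mem_cons.mp hc with h | h
            · push_cast at h; omega
            · exact hs h)]
      rw [hhead]
      by_cases hc : PySem.Set.contains S s = true
      · rw [hc]
        simp only [Bool.not_true, Bool.false_eq_true, if_false]
        exact htail
      · replace hc : PySem.Set.contains S s = false := by rw [Bool.eq_false_iff]; exact hc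
        rw [hc]
        simp only [Bool.not_false, if_true, List.map_cons]
        rw [htail]

lemma cdKeep_eq_keepFrom (d : List Int) (S : List Int) : cdKeep d S = cdKeepFrom 0 d S := rfl

lemma two_pow_sub_one_int (n : Nat) : ((2:Int) ^ n - 1) = (((2 ^ n - 1 : Nat)) : Int) := by
  have : 1 ≤ 2 ^ n := Nat.one_le_two_pow
  push_cast [this]
  ring

-- parity membership: x ∈ cdParity (n+1) ↔ x = 2^n - 1 ∨ x ∈ cdParity n
lemma mem_cdParity_succ (n : Nat) (x : Int) :
    x ∈ cdParity ((n : Int) + 1) ↔ x ∈ ((2:Int) ^ n - 1) :: (cdParity (n : Int)) := by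
  unfold cdParity
  rw [PySem.Set.mem_ofList]
  have hsplit : PySem.List.pyRange 1 ((n:Int) + 1 + 1) 1
      = PySem.List.pyRange 1 ((n:Int) + 1) 1 ++ [(n:Int) + 1] :=
    PySem.List.pyRange_one_succ_right (by omega)
  rw [hsplit, List.map_append, List.map_singleton]
  have : (((n:Int) + 1 - 1).toNat) = n := by omega
  rw [this]
  simp only [List.mem_append, List.mem_cons, PySem.Set.mem_ofList]
  tauto

lemma mem_cdParity_lt (n : Nat) (x : Int) (hx : x ∈ cdParity (n : Int)) :
    x < (2:Int) ^ n - 1 := by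
  unfold cdParity at hx
  rw [PySem.Set.mem_ofList] at hx
  rcases List.mem_map.mp hx with ⟨y, hy, rfl⟩
  rcases PySem.List.mem_pyRange_one.mp hy with ⟨h1, h2⟩
  have hyn : (y - 1).toNat < n := by omega
  have : (2:Int) ^ (y - 1).toNat < (2:Int) ^ n := by
    have := pow_lt_pow_right₀ (a := (2:Int)) (by norm_num) hyn
    exact this
  omega

lemma cdParity_zero : cdParity 0 = [] := by
  unfold cdParity
  rw [PySem.List.pyRange_one_eq_nil (by norm_num)]
  rfl

-- the core equivalence of the two loop shapes
lemma cdPops_eq (n : Nat) : ∀ d : List Int, (n = 0 ∨ 2 ^ (n - 1) ≤ d.length) →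
    cdPops (n : Int) d = some (cdKeep d (cdParity (n : Int))) := by
  induction n with
  | zero =>
    intro d _
    unfold cdPops
    rw [PySem.List.pyRange_neg_one_eq_nil (by norm_num)]
    simp only [List.foldl_nil, Nat.cast_zero]
    rw [cdKeep_eq_keepFrom, cdParity_zero, cdKeepFrom_nil_set]
  | succ n ih =>
    intro d hlen
    simp only [Nat.cast_add, Nat.cast_one]
    have hlen' : 2 ^ n ≤ d.length := by
      rcases hlen with h | h
      · omega
      · simpa using h
    have hpow1 : 1 ≤ 2 ^ n := Nat.one_le_two_pow
    have hmlt : 2 ^ n - 1 < d.length := by omega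
    unfold cdPops
    rw [PySem.List.pyRange_neg_one_cons (by positivity)]
    rw [List.foldl_cons]
    have hidx : (((n : Int) + 1 - 1).toNat) = n := by omega
    simp only [Option.bind_some] at *
    have hpop : PySem.List.pop? d ((2:Int) ^ (((n:Int) + 1 - 1)).toNat - 1)
        = some (d[2 ^ n - 1]'hmlt, d.eraseIdx (2 ^ n - 1)) := by
      rw [hidx, two_pow_sub_one_int]
      exact PySem.List.pop?_natCast d (2 ^ n - 1) hmlt
    rw [show ((n : Int) + 1 - 1) = (n : Int) by ring] at hpop ⊢
    rw [hpop]
    simp only [Option.map_some]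
    have hih := ih (d.eraseIdx (2 ^ n - 1)) (by
      rcases Nat.eq_zero_or_pos n with h0 | hpos
      · left; exact h0
      · right
        have hlen2 : (d.eraseIdx (2 ^ n - 1)).length = d.length - 1 := by
          rw [List.length_eraseIdx_of_lt hmlt]
        rw [hlen2]
        have h2 : 2 ^ n = 2 * 2 ^ (n - 1) := by
          conv_lhs => rw [show n = (n - 1) + 1 by omega]
          rw [pow_succ]; ring
        have hp1 : 1 ≤ 2 ^ (n - 1) := Nat.one_le_two_pow
        omega)
    unfold cdPops at hih
    rw [hih]
    congr 1
    rw [cdKeep_eq_keepFrom, cdKeep_eq_keepFrom]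
    have herase := cdKeepFrom_eraseIdx (2 ^ n - 1) d 0 (cdParity (n : Int)) hmlt
      (by intro x hx
          have := mem_cdParity_lt n x hx
          have := two_pow_sub_one_int n
          omega)
    rw [herase]
    apply cdKeepFrom_congr
    intro x
    rw [mem_cdParity_succ n x]
    simp only [List.mem_cons]
    constructor
    · rintro (h | h)
      · left; rw [h]; rw [two_pow_sub_one_int]; omega
      · right; exact h
    · rintro (h | h)
      · left; rw [h]; rw [two_pow_sub_one_int]; omega
      · right; exact h

lemma cdPops_eq_of_pre (pb : Int) (d : List Int)
    (h : pb ≤ 0 ∨ (d ≠ [] ∧ pb ≤ (Nat.log2 d.length : Int) + 1)) :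
    cdPops pb d = some (cdKeep d (cdParity pb)) := by
  by_cases hle : pb ≤ 0
  · -- pb ≤ 0: both the pop range and the parity range are empty
    unfold cdPops
    rw [PySem.List.pyRange_neg_one_eq_nil hle]
    simp only [List.foldl_nil]
    have : cdParity pb = [] := by
      unfold cdParity
      rw [PySem.List.pyRange_one_eq_nil (by omega)]
      rfl
    rw [this, cdKeep_eq_keepFrom, cdKeepFrom_nil_set]
  · rcases h with h | ⟨hne, hlog⟩
    · exact absurd h hle
    · have hlen0 : d.length ≠ 0 := by
        intro h0; exact hne (List.eq_nil_of_length_eq_zero h0)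
      set n := pb.toNat with hn
      have hpb : pb = (n : Int) := by omega
      have hlogn : n - 1 ≤ Nat.log2 d.length := by omega
      have hpow : 2 ^ (n - 1) ≤ d.length := (Nat.le_log2 hlen0).mp hlogn
      rw [hpb]
      exact cdPops_eq n d (Or.inr hpow)

-- ===== VERDICT (by name: the statement is the Claim_ definition above) =====
theorem correct_data_spec : Claim_equal_correct_data := by
  intro data pos pb _ hpre
  obtain ⟨hpos, hpb⟩ := hpre
  unfold Spec_correct_data correct_data correct_data_alt
  by_cases hp : pos ≠ -1
  · have hin : PySem.Raise.InRange data.length pos := by tauto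
    rw [if_pos hp, if_pos hp]
    cases hgv : PySem.List.pyGet? data pos with
    | none => exact absurd ((PySem.List.pyGet?_eq_none_iff data pos).mp hgv) (not_not.mpr hin)
    | some v =>
      simp only
      have hdlen : (PySem.List.pySetD data pos (PySem.Int.bxor v 1)).length = data.length :=
        PySem.List.length_pySetD data pos _
      have hpre' : pb ≤ 0 ∨ (PySem.List.pySetD data pos (PySem.Int.bxor v 1) ≠ [] ∧
          pb ≤ (Nat.log2 (PySem.List.pySetD data pos (PySem.Int.bxor v 1)).length : Int) + 1) := by
        rcases hpb with h | ⟨h1, h2⟩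
        · left; exact h
        · right
          refine ⟨fun h0 => h1 (List.eq_nil_of_length_eq_zero ?_), by rw [hdlen]; exact h2⟩
          rw [← hdlen, h0]; rfl
      rw [cdPops_eq_of_pre pb _ hpre']
  · rw [if_neg hp, if_neg hp]
    simp only
    rw [cdPops_eq_of_pre pb data hpb]
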